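-- pv_equiv track=rewrite | github.com/geeknow112/lottery | lottery.py | checkUpopoi
-- ===== SOURCE A (Python) =====
-- def checkUpopoi(sconf, sorry_lists):
-- 	cnt_l = int(len(sorry_lists))
-- 	limits = list()
-- 	chLims = list()
-- 	#pprint(sconf.pop(len(sconf) - 1))
-- 	#pprint(sum(sconf))
-- 	for i in range(len(sconf)):
-- 		cnt_w = sum(sconf)
-- 		if cnt_w > cnt_l:
-- 			idx = len(sconf) -1
-- 			lim = sconf.pop(idx)
-- 			chLims.insert(0, idx)
-- 		else:
-- 			limits = sconf
--
-- 	# 当選枠より注文者数が多い場合の処理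
-- 	if len(chLims) != 0:
-- 		#pprint(chLims)
-- 		for i in range(len(chLims)):
-- 			if i == 0:
-- 				limits.append(cnt_l - sum(sconf) - (len(chLims) - 1))
-- 			else:
-- 				limits.append(1)
-- 	return limits
-- ===== SOURCE B (Python) =====
-- # Single prefix-sum scan: find the longest prefix whose sum fits cnt_l, slice once,
-- # then pad with the remainder and ones. Performs the same in-place mutation of sconf as the original.
-- def checkUpopoi(sconf, sorry_lists):
--     cnt_l = len(sorry_lists)
--     n = len(sconf)
--     i = m = run = 0
--     for v in sconf:
--         run += v
--         if run <= cnt_l: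
--             m = i + 1
--         i += 1
--     k = n - m
--     del sconf[m:]
--     if k == 0:
--         return sconf
--     fills = [cnt_l - sum(sconf) - (k - 1)] + [1] * (k - 1)
--     if m > 0:
--         sconf.extend(fills)
--         return sconf
--     return fills
-- ===== Notes on version B (the rewrite author's own statement) =====
-- stated objective: faster
-- what changed: Replaces A's loop that re-sums the list and pops one element per iteration (plus a second append loop) with a single prefix-sum scan that finds the longest prefix fitting the order count, one slice and one padding-list construction.
import Mathlib
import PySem

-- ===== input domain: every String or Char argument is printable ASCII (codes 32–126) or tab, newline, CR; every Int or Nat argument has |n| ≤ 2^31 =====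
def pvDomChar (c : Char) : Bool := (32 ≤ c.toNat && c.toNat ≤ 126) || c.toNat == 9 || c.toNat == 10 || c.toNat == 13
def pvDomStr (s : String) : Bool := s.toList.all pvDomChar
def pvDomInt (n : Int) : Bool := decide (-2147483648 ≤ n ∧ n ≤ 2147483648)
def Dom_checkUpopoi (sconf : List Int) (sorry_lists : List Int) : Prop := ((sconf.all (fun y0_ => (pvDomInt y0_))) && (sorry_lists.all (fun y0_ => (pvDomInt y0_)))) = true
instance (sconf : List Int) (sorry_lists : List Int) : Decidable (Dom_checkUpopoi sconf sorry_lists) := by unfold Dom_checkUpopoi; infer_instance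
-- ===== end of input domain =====

-- B replaces A's n-iteration pop loop (each iteration re-summing the list) with one prefix-sum
-- scan plus a single slice; equivalence is about the RETURN value (both Pythons also mutate
-- sconf in place, in the same way).

-- ===== PORT A =====
-- one loop iteration of A's first for-loop (the loop variable i is unused by the body);
-- state = (sconf, limits, chLims); sconf.pop(len-1) = dropLast, chLims.insert(0, idx) = idx :: chLims
def stepA (cnt_l : Int) (st : List Int × List Int × List Int) (_i : Nat) :
    List Int × List Int × List Int :=
  let s := st.1
  let cnt_w := s.sum
  if cnt_w > cnt_l then
    (s.dropLast, st.2.1, ((s.length : Int) - 1) :: st.2.2)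
  else
    (s, s, st.2.2)

def checkUpopoi (sconf : List Int) (sorry_lists : List Int) : List Int :=
  let cnt_l : Int := (sorry_lists.length : Int)
  let st := (List.range sconf.length).foldl (stepA cnt_l) (sconf, ([] : List Int), ([] : List Int))
  let s := st.1
  let limits := st.2.1
  let chLims := st.2.2
  if chLims.length ≠ 0 then
    -- in Python `limits` may alias `sconf`; sum(sconf) is read before any append, so it is s.sum
    (List.range chLims.length).foldl
      (fun limits i =>
        if i = 0 then limits ++ [cnt_l - s.sum - ((chLims.length : Int) - 1)]
        else limits ++ [1]) limits
  else limits

-- ===== PORT B =====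
-- one prefix-sum scan: state = (i, m, run); m = longest prefix length with running sum ≤ cnt_l
def stepB (cnt_l : Int) (st : Nat × Nat × Int) (v : Int) : Nat × Nat × Int :=
  let run := st.2.2 + v
  (st.1 + 1, if run ≤ cnt_l then st.1 + 1 else st.2.1, run)

def checkUpopoi_alt (sconf : List Int) (sorry_lists : List Int) : List Int :=
  let cnt_l : Int := (sorry_lists.length : Int)
  let n := sconf.length
  let st := sconf.foldl (stepB cnt_l) (0, 0, 0)
  let m := st.2.1
  let k := n - m
  let kept := sconf.take m           -- `del sconf[m:]`
  if k = 0 then kept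
  else
    let fills := (cnt_l - kept.sum - ((k : Int) - 1)) :: List.replicate (k - 1) 1
    if m > 0 then kept ++ fills else fills

-- ===== PRECONDITION & SPEC =====
def Spec_checkUpopoi (sconf : List Int) (sorry_lists : List Int) (out : List Int) : Prop := out = checkUpopoi_alt sconf sorry_lists
instance (sconf : List Int) (sorry_lists : List Int) (out : List Int) : Decidable (Spec_checkUpopoi sconf sorry_lists out) := by unfold Spec_checkUpopoi; infer_instance

-- ===== CLAIM (what is proved, stated in full; the proofs are below) =====
def Claim_equal_checkUpopoi : Prop := ∀ (sconf : List Int) (sorry_lists : List Int), Dom_checkUpopoi sconf sorry_lists → Spec_checkUpopoi sconf sorry_lists (checkUpopoi sconf sorry_lists)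

-- ===== LEMMAS AND PROOFS =====

-- the common specification: repeatedly drop the last element while the sum exceeds c
def trim (c : Int) (s : List Int) : List Int :=
  if h : s.sum ≤ c ∨ s = [] then s
  else trim c s.dropLast
termination_by s.length
decreasing_by
  have hs : s ≠ [] := by tauto
  cases s with
  | nil => exact absurd rfl hs
  | cons a t => simp

lemma trim_of_le {c : Int} {s : List Int} (h : s.sum ≤ c) : trim c s = s := by
  rw [trim]; simp [h]

lemma trim_of_gt {c : Int} {s : List Int} (h : c < s.sum) (hs : s ≠ []) :
    trim c s = trim c s.dropLast := by
  rw [trim]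
  have hne : ¬ (s.sum ≤ c ∨ s = []) := by
    rintro (h1 | h2)
    · omega
    · exact hs h2
  simp [hne]

lemma trim_length_le (c : Int) (s : List Int) : (trim c s).length ≤ s.length := by
  rw [trim]
  split
  · exact le_refl _
  · calc (trim c s.dropLast).length ≤ s.dropLast.length := trim_length_le c s.dropLast
      _ ≤ s.length := by simp
termination_by s.length
decreasing_by
  have hs : s ≠ [] := by tauto
  cases s with
  | nil => exact absurd rfl hs
  | cons a t => simp

-- characterisation of A's first loop (body ignores the loop variable)
lemma loopA_char (c : Int) (hc : 0 ≤ c) :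
    ∀ (l : List Nat) (s lim ch : List Int),
      (s.length ≤ l.length ∨ (s.sum ≤ c ∧ lim = s)) →
      (l.foldl (stepA c) (s, lim, ch)).1 = trim c s ∧
      (l.foldl (stepA c) (s, lim, ch)).2.1
        = (if l.length = s.length ∧ trim c s = [] then lim else trim c s) ∧
      (l.foldl (stepA c) (s, lim, ch)).2.2.length
        = ch.length + (s.length - (trim c s).length) := by
  intro l
  induction l with
  | nil =>
    intro s lim ch hlen
    rcases hlen with h | ⟨hsum, rfl⟩
    · have hs : s = [] := by
        cases s with
        | nil => rfl
        | cons a t => simp at h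
      subst hs
      have ht : trim c ([] : List Int) = [] := trim_of_le (by simpa using hc)
      simp [ht]
    · have ht : trim c lim = lim := trim_of_le hsum
      refine ⟨by simp [ht], ?_, by simp [ht]⟩
      simp only [List.foldl_nil, ht]
      split <;> rfl
  | cons a l ih =>
    intro s lim ch hlen
    by_cases hgt : s.sum > c
    · have hlen1 : s.length ≤ (a :: l).length := by
        rcases hlen with h | ⟨h, _⟩
        · exact h
        · omega
      have hs : s ≠ [] := by
        rintro rfl; simp at hgt; omega
      have h1s : 1 ≤ s.length := by
        cases s with
        | nil => exact absurd rfl hs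
        | cons x t => simp
      have hstep : stepA c (s, lim, ch) a = (s.dropLast, lim, ((s.length : Int) - 1) :: ch) := by
        simp [stepA, hgt]
      have hdl : s.dropLast.length = s.length - 1 := by
        cases s with
        | nil => exact absurd rfl hs
        | cons x t => simp
      have hlen' : s.dropLast.length ≤ l.length := by
        simp at hlen1; omega
      have httr : trim c s = trim c s.dropLast := trim_of_gt hgt hs
      obtain ⟨h1, h2, h3⟩ := ih s.dropLast lim (((s.length : Int) - 1) :: ch) (Or.inl hlen')
      refine ⟨?_, ?_, ?_⟩
      · simpa [List.foldl_cons, hstep, httr] using h1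
      · rw [List.foldl_cons, hstep, h2, httr]
        have hiff : (l.length = s.dropLast.length ∧ trim c s.dropLast = [])
            ↔ ((a :: l).length = s.length ∧ trim c s.dropLast = []) := by
          constructor
          · rintro ⟨he, h0⟩
            refine ⟨?_, h0⟩
            simp [hdl] at he ⊢; omega
          · rintro ⟨he, h0⟩
            refine ⟨?_, h0⟩
            simp [hdl] at he ⊢; omega
        by_cases hcond : l.length = s.dropLast.length ∧ trim c s.dropLast = []
        · rw [if_pos hcond, if_pos (hiff.1 hcond)]
        · rw [if_neg hcond, if_neg (fun h => hcond (hiff.2 h))]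
      · rw [List.foldl_cons, hstep, h3, httr]
        have htl : (trim c s.dropLast).length ≤ s.dropLast.length := trim_length_le _ _
        simp [hdl] at htl ⊢
        omega
    · rw [not_lt] at hgt
      have hstep : stepA c (s, lim, ch) a = (s, s, ch) := by
        simp only [stepA]; rw [if_neg (by omega)]
      have ht : trim c s = s := trim_of_le hgt
      obtain ⟨h1, h2, h3⟩ := ih s s ch (Or.inr ⟨hgt, rfl⟩)
      refine ⟨?_, ?_, ?_⟩
      · simpa [List.foldl_cons, hstep] using h1
      · rw [List.foldl_cons, hstep, h2]
        simp only [ht]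
        by_cases hcg : (a :: l).length = s.length ∧ s = []
        · exact absurd hcg (by rintro ⟨he, rfl⟩; simp at he)
        · rw [if_neg hcg]
          split <;> rfl
      · rw [List.foldl_cons, hstep, h3]

-- characterisation of B's prefix-sum scan
lemma scanB_char (c : Int) (hc : 0 ≤ c) :
    ∀ (s : List Int),
      (s.foldl (stepB c) (0, 0, 0)).1 = s.length ∧
      (s.foldl (stepB c) (0, 0, 0)).2.2 = s.sum ∧
      (s.foldl (stepB c) (0, 0, 0)).2.1 ≤ s.length ∧
      s.take (s.foldl (stepB c) (0, 0, 0)).2.1 = trim c s := by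
  intro s
  induction s using List.reverseRecOn with
  | nil =>
    have : trim c ([] : List Int) = [] := trim_of_le (by simpa using hc)
    simp [this]
  | append_singleton s a ih =>
    obtain ⟨hi, hr, hm, ht⟩ := ih
    rw [List.foldl_append]
    set st := s.foldl (stepB c) (0, 0, 0) with hst
    have hstep : stepB c st a
        = (st.1 + 1, if st.2.2 + a ≤ c then st.1 + 1 else st.2.1, st.2.2 + a) := rfl
    rw [List.foldl_cons, List.foldl_nil, hstep]
    by_cases hle : st.2.2 + a ≤ c
    · have hsum : (s ++ [a]).sum ≤ c := by simp [hr] at hle ⊢; omega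
      have htr : trim c (s ++ [a]) = s ++ [a] := trim_of_le hsum
      refine ⟨by simp [hi], by simp [hr], ?_, ?_⟩
      · simp [hle, hi]
      · simp [hle, hi, htr, List.take_of_length_le]
    · have hsum : c < (s ++ [a]).sum := by simp [hr] at hle ⊢; omega
      have htr : trim c (s ++ [a]) = trim c s := by
        rw [trim_of_gt hsum (by simp)]
        congr 1
        simp
      refine ⟨by simp [hi], by simp [hr], ?_, ?_⟩
      · simp [hle]; omega
      · simp only [if_neg hle]
        rw [List.take_append_of_le_length hm, ht, htr]

-- A's second loop: one big element then ones
lemma loop2_ones (c X : Int) (lim : List Int) (kk : Nat) :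
    ∀ (j st : Nat), 1 ≤ st →
      (List.range' st j).foldl
        (fun limits i => if i = 0 then limits ++ [c - X - ((kk : Int) - 1)] else limits ++ [1]) lim
      = lim ++ List.replicate j 1 := by
  intro j
  induction j generalizing lim with
  | zero => intro st _; simp
  | succ j ihj =>
    intro st hst
    rw [List.range'_succ, List.foldl_cons]
    have hne : st ≠ 0 := by omega
    rw [if_neg hne, ihj (lim ++ [1]) (st + 1) (by omega)]
    simp [List.replicate_succ]

lemma loop2_char (c X : Int) (lim : List Int) (k : Nat) (hk : 1 ≤ k) :
    (List.range k).foldl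
      (fun limits i => if i = 0 then limits ++ [c - X - ((k : Int) - 1)] else limits ++ [1]) lim
    = lim ++ (c - X - ((k : Int) - 1)) :: List.replicate (k - 1) 1 := by
  obtain ⟨j, rfl⟩ : ∃ j, k = j + 1 := ⟨k - 1, by omega⟩
  rw [List.range_eq_range', List.range'_succ, List.foldl_cons, if_pos rfl,
    loop2_ones c X _ (j + 1) j 1 (by omega)]
  simp

-- ===== VERDICT (by name: the statement is the Claim_ definition above) =====
theorem checkUpopoi_spec : Claim_equal_checkUpopoi := by
  intro sconf sorry_lists _
  unfold Spec_checkUpopoi checkUpopoi checkUpopoi_alt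
  dsimp only
  have hc0 : (0 : Int) ≤ (sorry_lists.length : Int) := by positivity
  obtain ⟨hA1, hA2, hA3⟩ :=
    loopA_char ((sorry_lists.length : Int)) hc0 (List.range sconf.length) sconf [] [] (Or.inl (by simp))
  obtain ⟨hB1, hB2, hB3, hB4⟩ := scanB_char ((sorry_lists.length : Int)) hc0 sconf
  set m := (sconf.foldl (stepB ((sorry_lists.length : Int))) (0, 0, 0)).2.1 with hm
  set t := trim ((sorry_lists.length : Int)) sconf with htd
  set stA := List.foldl (stepA ((sorry_lists.length : Int)))
      (sconf, ([] : List Int), ([] : List Int)) (List.range sconf.length) with hsA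
  have hmlen : t.length = m := by rw [← hB4, List.length_take]; omega
  have hlimits : stA.2.1 = t := by
    rw [hA2]
    split
    · rename_i h; rw [h.2]
    · rfl
  have hch : stA.2.2.length = sconf.length - m := by rw [hA3, hmlen]; simp
  rw [hA1, hlimits, hch, hB4]
  by_cases hk : sconf.length - m = 0
  · simp [hk]
  · rw [if_pos hk, if_neg hk,
      loop2_char ((sorry_lists.length : Int)) t.sum t (sconf.length - m) (by omega)]
    by_cases hm0 : m > 0
    · rw [if_pos hm0]
    · rw [if_neg hm0]
      have hm' : m = 0 := by omega
      have ht0 : t = [] := by rw [← hB4, hm']; simp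
      rw [ht0, List.nil_append]
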